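-- pv_equiv track=rewrite | github.com/V0lT999/COA1 | Task1/Fourier.py | fourier_method
-- ===== SOURCE A (Python) =====
-- def fourier_method(a: list, b: list):
--     len_a = len(a)
--     a = [0 for i in range(len(b)-1)] + a[::-1] + [0 for i in range(len(b)-1)]
--     num = 0
--     product = []
--     result = {}
--     for i in range(len_a+len(b)-1):
--         sum = num
--         for j in range(len(b)):
--             sum += a[i+j] * b[j]
--         product.append(str(sum % 10))
--         num = sum // 10
--         result[str(i+1)] = ''.join(product[::-1])
--         if num > 0:
--             result[str(i+1)] = ''.join([f'({num})', result[str(i+1)]])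
--
--     if num > 0:
--         product.append(str(num))
--     result['result'] = ''.join(product[::-1])
--     result['count'] = str(len_a+len(b)-1)
--     return result
-- ===== SOURCE B (Python) =====
-- def fourier_method(a: list, b: list):
--     la, lb = len(a), len(b)
--     n = la + lb - 1
--     arev, brev = a[::-1], b[::-1]
--     # pass 1: build the coefficient table by scattering every digit product
--     # into its column (classic schoolbook scatter), no padding, no window
--     conv = [0] * n
--     for k in range(la):
--         for m in range(lb):
--             conv[k + m] += arev[k] * brev[m]
--     # pass 2: maintain the partial product as ONE integer T = sum conv[i]*10^i;
--     # each snapshot digit and the carry are read off T by division, no carry chain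
--     result = {}
--     T, digits, carry, p = 0, '', 0, 1
--     for i in range(n):
--         T += conv[i] * p
--         digits = str((T // p) % 10) + digits
--         p *= 10
--         carry = T // p
--         result[str(i + 1)] = f'({carry}){digits}' if carry > 0 else digits
--     result['result'] = (str(carry) + digits) if carry > 0 else digits
--     result['count'] = str(n)
--     return result
-- ===== Notes on version B (the rewrite author's own statement) =====
-- stated objective: alternative
-- what changed: A's fused sliding-window-over-padded-a convolution with a chained carry variable is replaced by a scatter-accumulated coefficient table (conv[k+m] += arev[k]*brev[m], no padding) followed by a pass that keeps the whole partial product as ONE integer T = sum conv[i]*10^i and reads each snapshot digit and carry off T by floor division, with no propagated carry chain.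
import Mathlib
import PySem

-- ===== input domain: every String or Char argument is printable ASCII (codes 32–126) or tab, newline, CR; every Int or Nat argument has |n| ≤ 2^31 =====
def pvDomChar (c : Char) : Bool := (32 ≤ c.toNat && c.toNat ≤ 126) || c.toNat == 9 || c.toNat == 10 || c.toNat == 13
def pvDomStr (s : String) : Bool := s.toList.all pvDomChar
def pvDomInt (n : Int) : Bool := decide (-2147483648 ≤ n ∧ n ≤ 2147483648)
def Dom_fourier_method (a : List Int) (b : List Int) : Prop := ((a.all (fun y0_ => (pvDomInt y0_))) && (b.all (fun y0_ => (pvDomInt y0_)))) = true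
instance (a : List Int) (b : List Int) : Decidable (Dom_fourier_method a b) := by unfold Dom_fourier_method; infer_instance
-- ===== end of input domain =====

-- B replaces A's fused padded-sliding-window convolution + chained carry with a scatter-built
-- coefficient table and a pass holding the partial product as ONE integer, reading digits/carry
-- off it by floor division (objective: alternative; return-value equivalence).


-- ===== PORT A =====
-- one iteration of A's fused loop (state: num, product, result); the inner fold is
-- A's 'for j in range(len(b))' accumulation; pyGetD is exact here: every index a[i+j], b[j]
-- Python touches is in range, so Python never raises and the default is never used
def fourierStepA (aPad : List Int) (b : List Int)
    (st : Int × List String × PySem.Dict String String) (i : Int) :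
    Int × List String × PySem.Dict String String :=
  let sum := (PySem.List.pyRange 0 (b.length : Int) 1).foldl
      (fun s j => s + PySem.List.pyGetD aPad (i + j) 0 * PySem.List.pyGetD b j 0) st.1
  let product := st.2.1 ++ [PySem.Int.toStr (PySem.Int.mod sum 10)]
  let num := PySem.Int.floordiv sum 10
  let key := PySem.Int.toStr (i + 1)
  let result := st.2.2.insert key (PySem.Str.join "" product.reverse)
  let result := if num > 0 then
      result.insert key (PySem.Str.join "" [PySem.Str.join "" ["(", PySem.Int.toStr num, ")"], result.getD key ""])
    else result
  (num, product, result)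

def fourier_method (a : List Int) (b : List Int) : List (String × String) :=
  let len_a := a.length
  let aPad := List.replicate (b.length - 1) (0 : Int) ++ a.reverse ++ List.replicate (b.length - 1) (0 : Int)
  let fin := (PySem.List.pyRange 0 ((len_a : Int) + (b.length : Int) - 1) 1).foldl
      (fourierStepA aPad b) (0, [], PySem.Dict.empty)
  let product := if fin.1 > 0 then fin.2.1 ++ [PySem.Int.toStr fin.1] else fin.2.1
  let result := fin.2.2.insert "result" (PySem.Str.join "" product.reverse)
  let result := result.insert "count" (PySem.Int.toStr ((len_a : Int) + (b.length : Int) - 1))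
  result.items

-- ===== PORT B =====
-- B pass 1, inner loop: 'for m in range(lb): conv[k+m] += arev[k] * brev[m]'
-- (every write lands in range, so pySetD/pyGetD are exact)
def fourierScatB (arev brev : List Int) (cv : List Int) (k : Int) : List Int :=
  (PySem.List.pyRange 0 (brev.length : Int) 1).foldl
    (fun cv m => PySem.List.pySetD cv (k + m)
      (PySem.List.pyGetD cv (k + m) 0 + PySem.List.pyGetD arev k 0 * PySem.List.pyGetD brev m 0)) cv

-- B pass 2, one step (state: T, digits, carry, p, result)
def fourierStepB (conv : List Int)
    (st : Int × String × Int × Int × PySem.Dict String String) (i : Int) :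
    Int × String × Int × Int × PySem.Dict String String :=
  let T := st.1 + PySem.List.pyGetD conv i 0 * st.2.2.2.1
  let digits := PySem.Str.join "" [PySem.Int.toStr (PySem.Int.mod (PySem.Int.floordiv T st.2.2.2.1) 10), st.2.1]
  let p := st.2.2.2.1 * 10
  let carry := PySem.Int.floordiv T p
  let snap := if carry > 0 then PySem.Str.join "" ["(", PySem.Int.toStr carry, ")", digits] else digits
  (T, digits, carry, p, st.2.2.2.2.insert (PySem.Int.toStr (i + 1)) snap)

def fourier_method_alt (a : List Int) (b : List Int) : List (String × String) :=
  let n : Int := (a.length : Int) + (b.length : Int) - 1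
  let arev := a.reverse
  let brev := b.reverse
  let conv := (PySem.List.pyRange 0 (a.length : Int) 1).foldl (fourierScatB arev brev)
      (List.replicate n.toNat (0 : Int))
  let fin := (PySem.List.pyRange 0 n 1).foldl (fourierStepB conv) (0, "", 0, 1, PySem.Dict.empty)
  let final := if fin.2.2.1 > 0 then PySem.Str.join "" [PySem.Int.toStr fin.2.2.1, fin.2.1] else fin.2.1
  let result := fin.2.2.2.2.insert "result" final
  let result := result.insert "count" (PySem.Int.toStr n)
  result.items

-- ===== PRECONDITION & SPEC =====
def Spec_fourier_method (a : List Int) (b : List Int) (out : List (String × String)) : Prop := out = fourier_method_alt a b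
instance (a : List Int) (b : List Int) (out : List (String × String)) : Decidable (Spec_fourier_method a b out) := by unfold Spec_fourier_method; infer_instance

-- ===== CLAIM (what is proved, stated in full; the proofs are below) =====
def Claim_equal_fourier_method : Prop := ∀ (a : List Int) (b : List Int), Dom_fourier_method a b → Spec_fourier_method a b (fourier_method a b)

-- ===== LEMMAS AND PROOFS =====

-- ---------- string lemmas ----------
theorem chars_join_nil_eq_flatten (parts : List (List Char)) :
    PySem.Chars.join [] parts = parts.flatten := by
  induction parts with
  | nil => rfl
  | cons p ps ih =>
    cases ps with
    | nil => simp [PySem.Chars.join, List.intercalate]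
    | cons q qs =>
      simp only [PySem.Chars.join, List.intercalate] at *
      simp_all [List.intersperse]

theorem str_ext {s t : String} (h : s.toList = t.toList) : s = t :=
  String.toList_inj.mp h

theorem toList_join_empty (parts : List String) :
    (PySem.Str.join "" parts).toList = (parts.map String.toList).flatten := by
  rw [PySem.Str.toList_join]
  have h0 : ("" : String).toList = ([] : List Char) := rfl
  rw [h0, chars_join_nil_eq_flatten]

theorem join_rev_append (xs : List String) (d : String) :
    PySem.Str.join "" ((xs ++ [d]).reverse) = PySem.Str.join "" [d, PySem.Str.join "" xs.reverse] := by
  apply str_ext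
  simp only [toList_join_empty, List.map_cons, List.map_nil, List.map_reverse, List.map_append]
  simp

theorem join_empty_nil : PySem.Str.join "" (([] : List String).reverse) = "" := by
  apply str_ext
  simp only [toList_join_empty, List.reverse_nil, List.map_nil, List.flatten_nil]
  rfl

theorem join_paren (t s : String) :
    PySem.Str.join "" [PySem.Str.join "" ["(", t, ")"], s] = PySem.Str.join "" ["(", t, ")", s] := by
  apply str_ext
  simp only [toList_join_empty, List.map_cons, List.map_nil]
  simp

-- ---------- scatter side (B's pass 1) ----------
-- one inner-loop step of B's scatter, with Nat loop index
def scatNat (brev : List Int) (x : Int) (k : Nat) (cv : List Int) (m : Nat) : List Int :=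
  PySem.List.pySetD cv ((k : Int) + (m : Int))
    (PySem.List.pyGetD cv ((k : Int) + (m : Int)) 0 + x * PySem.List.pyGetD brev (m : Int) 0)

theorem scatNat_foldl_length (brev : List Int) (x : Int) (k : Nat) :
    ∀ (l : List Nat) (cv : List Int), (l.foldl (scatNat brev x k) cv).length = cv.length := by
  intro l
  induction l with
  | nil => intro cv; rfl
  | cons m ms ih =>
    intro cv
    rw [List.foldl_cons, ih]
    simp [scatNat, PySem.List.length_pySetD]

theorem scatB_eq (arev brev cv : List Int) (k : Nat) :
    fourierScatB arev brev cv ((k : Nat) : Int)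
      = (List.range brev.length).foldl (scatNat brev (arev.getD k 0) k) cv := by
  unfold fourierScatB scatNat
  rw [PySem.List.pyRange_one, List.foldl_map]
  simp only [Int.sub_zero, Int.toNat_natCast, zero_add, PySem.List.pyGetD_natCast]

theorem scat_inner (brev : List Int) (x : Int) (k t : Nat) :
    ∀ (j : Nat) (cv : List Int), k + j ≤ cv.length → t < cv.length →
    PySem.List.pyGetD ((List.range j).foldl (scatNat brev x k) cv) (t : Int) 0
      = PySem.List.pyGetD cv (t : Int) 0
        + (if k ≤ t ∧ t - k < j then x * brev.getD (t - k) 0 else 0) := by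
  intro j
  induction j with
  | zero => intro cv _ _; simp
  | succ j ih =>
    intro cv hkj ht
    rw [List.range_succ, List.foldl_append, List.foldl_cons, List.foldl_nil]
    have hlen : ((List.range j).foldl (scatNat brev x k) cv).length = cv.length :=
      scatNat_foldl_length brev x k _ cv
    have hkjlen : k + j < cv.length := by omega
    have hcast : (k : Int) + (j : Int) = ((k + j : Nat) : Int) := by push_cast; ring
    set L := (List.range j).foldl (scatNat brev x k) cv with hL
    have happ : scatNat brev x k L j
        = PySem.List.pySetD L (((k + j : Nat) : Int))
            (PySem.List.pyGetD L (((k + j : Nat) : Int)) 0 + x * PySem.List.pyGetD brev (j : Int) 0) := by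
      unfold scatNat; rw [hcast]
    rw [happ, PySem.List.pyGetD_pySetD_natCast _ _ _ _ _ (by omega)]
    by_cases hte : t = k + j
    · subst hte
      rw [if_pos rfl, ih cv (by omega) ht]
      have h1 : ¬ (k ≤ k + j ∧ k + j - k < j) := by omega
      rw [if_neg h1, if_pos (by omega)]
      have h2 : k + j - k = j := by omega
      rw [h2]
      simp [PySem.List.pyGetD_natCast]
    · rw [if_neg hte, ih cv (by omega) ht]
      congr 1
      by_cases hc : k ≤ t ∧ t - k < j
      · rw [if_pos hc, if_pos (by omega)]
      · rw [if_neg hc, if_neg (by omega)]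

theorem scat_outer_length (arev brev : List Int) :
    ∀ (K : Nat) (cv : List Int),
    (((List.range K).foldl
        (fun cv kn => (List.range brev.length).foldl (scatNat brev (arev.getD kn 0) kn) cv) cv)).length
      = cv.length := by
  intro K
  induction K with
  | zero => intro cv; rfl
  | succ K ih =>
    intro cv
    rw [List.range_succ, List.foldl_append, List.foldl_cons, List.foldl_nil,
      scatNat_foldl_length, ih]

theorem scat_outer (arev brev : List Int) :
    ∀ (K : Nat) (cv : List Int) (t : Nat),
    (∀ k, k < K → k + brev.length ≤ cv.length) → t < cv.length →
    PySem.List.pyGetD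
        ((List.range K).foldl
          (fun cv kn => (List.range brev.length).foldl (scatNat brev (arev.getD kn 0) kn) cv) cv)
        (t : Int) 0
      = PySem.List.pyGetD cv (t : Int) 0
        + ∑ k ∈ Finset.range K,
            (if k ≤ t ∧ t - k < brev.length then arev.getD k 0 * brev.getD (t - k) 0 else 0) := by
  intro K
  induction K with
  | zero => intro cv t _ _; simp
  | succ K ih =>
    intro cv t hk ht
    rw [List.range_succ, List.foldl_append, List.foldl_cons, List.foldl_nil,
      Finset.sum_range_succ]
    set L := (List.range K).foldl
      (fun cv kn => (List.range brev.length).foldl (scatNat brev (arev.getD kn 0) kn) cv) cv with hL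
    have hlen : L.length = cv.length := by
      rw [hL]; exact scat_outer_length arev brev K cv
    have hKlen : K + brev.length ≤ cv.length := hk K (by omega)
    rw [scat_inner brev (arev.getD K 0) K t brev.length L (by omega) (by omega),
      ih cv t (fun k hkK => hk k (by omega)) ht]
    ring

-- ---------- gather side (A's inner loop) ----------
theorem pad_getD (arev : List Int) (m idx : Nat) :
    (List.replicate m (0 : Int) ++ arev ++ List.replicate m 0).getD idx 0
      = if m ≤ idx ∧ idx - m < arev.length then arev.getD (idx - m) 0 else 0 := by
  rw [List.getD_eq_getElem?_getD]
  by_cases h1 : idx < m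
  · rw [List.getElem?_append_left (by simp; omega), List.getElem?_append_left (by simp; omega)]
    rw [if_neg (by omega)]
    simp [h1]
  · by_cases h2 : idx - m < arev.length
    · rw [if_pos (by omega)]
      rw [List.getElem?_append_left (by simp; omega)]
      rw [List.getElem?_append_right (by simp; omega)]
      simp only [List.length_replicate]
      rw [List.getD_eq_getElem?_getD]
    · rw [if_neg (by omega)]
      rw [List.getElem?_append_right (by simp; omega)]
      simp [List.getElem?_replicate]
      split <;> rfl

theorem sum_bij_conv (arev brev : List Int) (t : Nat) :
    (∑ k ∈ Finset.range arev.length,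
        (if k ≤ t ∧ t - k < brev.length then arev.getD k 0 * brev.getD (t - k) 0 else 0))
      = ∑ m ∈ Finset.range brev.length,
          (if m ≤ t ∧ t - m < arev.length then arev.getD (t - m) 0 * brev.getD m 0 else 0) := by
  rw [← Finset.sum_filter, ← Finset.sum_filter]
  apply Finset.sum_nbij' (i := fun k => t - k) (j := fun m => t - m)
  · intro k hk
    simp only [Finset.mem_filter, Finset.mem_range] at *
    omega
  · intro m hm
    simp only [Finset.mem_filter, Finset.mem_range] at *
    omega
  · intro k hk
    simp only [Finset.mem_filter, Finset.mem_range] at hk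
    omega
  · intro m hm
    simp only [Finset.mem_filter, Finset.mem_range] at hm
    omega
  · intro k hk
    simp only [Finset.mem_filter, Finset.mem_range] at hk
    have h : t - (t - k) = k := by omega
    rw [h]

-- the scatter-built table agrees with A's window sum at every used index
theorem conv_eq (a b : List Int) (t : Nat)
    (ht : (t : Int) < (a.length : Int) + (b.length : Int) - 1) :
    PySem.List.pyGetD
        ((PySem.List.pyRange 0 (a.length : Int) 1).foldl (fourierScatB a.reverse b.reverse)
          (List.replicate ((a.length : Int) + (b.length : Int) - 1).toNat (0 : Int))) (t : Int) 0
      = ((PySem.List.pyRange 0 (b.length : Int) 1).map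
          (fun j => PySem.List.pyGetD
              (List.replicate (b.length - 1) (0 : Int) ++ a.reverse ++ List.replicate (b.length - 1) 0)
              ((t : Int) + j) 0 * PySem.List.pyGetD b j 0)).sum := by
  have hN : t < ((a.length : Int) + (b.length : Int) - 1).toNat := by omega
  rw [PySem.List.pyRange_one, List.foldl_map]
  simp only [Int.sub_zero, Int.toNat_natCast, zero_add]
  simp only [scatB_eq]
  rw [scat_outer a.reverse b.reverse a.length _ t
    (by intro k hk; simp only [List.length_replicate, List.length_reverse]; omega)
    (by simpa using hN)]
  have hzero : PySem.List.pyGetD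
      (List.replicate ((a.length : Int) + (b.length : Int) - 1).toNat (0 : Int)) (t : Int) 0 = 0 := by
    rw [PySem.List.pyGetD_natCast, List.getD_eq_getElem?_getD, List.getElem?_replicate]
    split <;> rfl
  rw [hzero, zero_add]
  conv_rhs => rw [PySem.List.pyRange_one]
  rw [List.map_map]
  have hmap : ∀ j : Nat,
      ((fun j => PySem.List.pyGetD
          (List.replicate (b.length - 1) (0 : Int) ++ a.reverse ++ List.replicate (b.length - 1) 0)
          ((t : Int) + j) 0 * PySem.List.pyGetD b j 0) ∘ (fun k : Nat => (0 : Int) + k)) j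
        = (if b.length - 1 ≤ t + j ∧ t + j - (b.length - 1) < a.reverse.length
            then a.reverse.getD (t + j - (b.length - 1)) 0 else 0) * b.getD j 0 := by
    intro j
    simp only [Function.comp_apply, zero_add]
    have hc : (t : Int) + (j : Int) = ((t + j : Nat) : Int) := by push_cast; ring
    rw [hc, PySem.List.pyGetD_natCast, PySem.List.pyGetD_natCast, pad_getD]
  rw [List.map_congr_left (fun j _ => hmap j)]
  simp only [Int.sub_zero, Int.toNat_natCast]
  show _ = ∑ j ∈ Finset.range b.length,
      (if b.length - 1 ≤ t + j ∧ t + j - (b.length - 1) < a.reverse.length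
        then a.reverse.getD (t + j - (b.length - 1)) 0 else 0) * b.getD j 0
  have hbij := sum_bij_conv a.reverse b.reverse t
  simp only [List.length_reverse] at hbij ⊢
  rw [hbij]
  conv_rhs => rw [← Finset.sum_range_reflect]
  apply Finset.sum_congr rfl
  intro m hm
  simp only [Finset.mem_range] at hm
  by_cases hmt : m ≤ t ∧ t - m < a.length
  · rw [if_pos hmt, if_pos (by omega)]
    have h1 : t + (b.length - 1 - m) - (b.length - 1) = t - m := by omega
    have h2 : b.reverse.getD m 0 = b.getD (b.length - 1 - m) 0 := by
      rw [List.getD_eq_getElem?_getD, List.getD_eq_getElem?_getD,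
        List.getElem?_reverse (by simpa using hm)]
    rw [h1, h2]
  · rw [if_neg hmt, if_neg (by omega), zero_mul]

-- ---------- the two loops in lockstep ----------
def pvRel (stA : Int × List String × PySem.Dict String String)
    (stB : Int × String × Int × Int × PySem.Dict String String) : Prop :=
  0 < stB.2.2.2.1 ∧ stA.1 = PySem.Int.floordiv stB.1 stB.2.2.2.1 ∧ stB.2.2.1 = stA.1 ∧
  stB.2.1 = PySem.Str.join "" stA.2.1.reverse ∧ stB.2.2.2.2 = stA.2.2

theorem step_rel (aPad b conv : List Int) (i : Int)
    (stA : Int × List String × PySem.Dict String String)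
    (stB : Int × String × Int × Int × PySem.Dict String String)
    (hc : PySem.List.pyGetD conv i 0
      = ((PySem.List.pyRange 0 (b.length : Int) 1).map
          (fun j => PySem.List.pyGetD aPad (i + j) 0 * PySem.List.pyGetD b j 0)).sum)
    (hR : pvRel stA stB) :
    pvRel (fourierStepA aPad b stA i) (fourierStepB conv stB i) := by
  obtain ⟨num, prod, res⟩ := stA
  obtain ⟨T, digits, carry, p, res'⟩ := stB
  obtain ⟨hp, hnum, hcarry, hdig, hres⟩ := hR
  simp only at hp hnum hcarry hdig hres
  subst hres hdig
  set S := ((PySem.List.pyRange 0 (b.length : Int) 1).map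
      (fun j => PySem.List.pyGetD aPad (i + j) 0 * PySem.List.pyGetD b j 0)).sum with hS
  have hsum : (PySem.List.pyRange 0 (b.length : Int) 1).foldl
      (fun s j => s + PySem.List.pyGetD aPad (i + j) 0 * PySem.List.pyGetD b j 0) num = num + S :=
    PySem.List.foldl_add _ _ _
  have hfdp : ∀ x : Int, PySem.Int.floordiv x p = x / p := by
    intro x; simp [pysem, hp]
  have hfd10 : ∀ x : Int, PySem.Int.floordiv x 10 = x / 10 := by
    intro x; simp [pysem]
  have hp10 : (0 : Int) < p * 10 := by positivity
  have hfdp10 : ∀ x : Int, PySem.Int.floordiv x (p * 10) = x / (p * 10) := by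
    intro x; simp [pysem, hp10]
  have hTp : PySem.Int.floordiv (T + S * p) p = num + S := by
    rw [hfdp, Int.add_mul_ediv_right _ _ (by omega : p ≠ 0), ← hfdp, ← hnum]
  have hcar : PySem.Int.floordiv (T + S * p) (p * 10) = PySem.Int.floordiv (num + S) 10 := by
    rw [hfdp10, ← Int.ediv_ediv_of_nonneg (by omega : (0:Int) ≤ p), ← hfdp, hTp, hfd10]
  unfold fourierStepA fourierStepB pvRel
  simp only [hsum, hc, hTp, hcar]
  refine ⟨by positivity, trivial, trivial, (join_rev_append prod _).symm, ?_⟩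
  set num' := PySem.Int.floordiv (num + S) 10 with hnum'
  by_cases hpos : num' > 0
  · rw [if_pos hpos, if_pos hpos]
    rw [PySem.Dict.getD_insert_self, PySem.Dict.insert_insert_self]
    rw [join_paren, join_rev_append]
  · rw [if_neg hpos, if_neg hpos, join_rev_append]

theorem fold_rel (aPad b conv : List Int) :
    ∀ (l : List Int)
      (stA : Int × List String × PySem.Dict String String)
      (stB : Int × String × Int × Int × PySem.Dict String String),
    (∀ i ∈ l, PySem.List.pyGetD conv i 0
      = ((PySem.List.pyRange 0 (b.length : Int) 1).map
          (fun j => PySem.List.pyGetD aPad (i + j) 0 * PySem.List.pyGetD b j 0)).sum) →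
    pvRel stA stB →
    pvRel (l.foldl (fourierStepA aPad b) stA) (l.foldl (fourierStepB conv) stB) := by
  intro l
  induction l with
  | nil => intro stA stB _ hR; exact hR
  | cons x xs ih =>
    intro stA stB hc hR
    exact ih _ _ (fun i hi => hc i (by simp [hi]))
      (step_rel aPad b conv x stA stB (hc x (by simp)) hR)

-- ===== VERDICT (by name: the statement is the Claim_ definition above) =====
theorem fourier_method_spec : Claim_equal_fourier_method := by
  intro a b _
  unfold Spec_fourier_method
  unfold fourier_method fourier_method_alt
  simp only []
  set n : Int := (a.length : Int) + (b.length : Int) - 1 with hn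
  set aPad := List.replicate (b.length - 1) (0 : Int) ++ a.reverse ++ List.replicate (b.length - 1) (0 : Int) with hPad
  set conv := (PySem.List.pyRange 0 (a.length : Int) 1).foldl (fourierScatB a.reverse b.reverse)
      (List.replicate n.toNat (0 : Int)) with hconv
  have hc : ∀ i ∈ PySem.List.pyRange 0 n 1,
      PySem.List.pyGetD conv i 0
        = ((PySem.List.pyRange 0 (b.length : Int) 1).map
            (fun j => PySem.List.pyGetD aPad (i + j) 0 * PySem.List.pyGetD b j 0)).sum := by
    intro i hi
    obtain ⟨h0, h1⟩ := PySem.List.mem_pyRange_one.mp hi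
    have hit : i = ((i.toNat : Nat) : Int) := (Int.toNat_of_nonneg h0).symm
    rw [hconv, hPad, hit, hn] at *
    exact conv_eq a b i.toNat (by omega)
  have hinit : pvRel (0, [], PySem.Dict.empty) (0, "", 0, 1, PySem.Dict.empty) := by
    refine ⟨by norm_num, by decide, rfl, join_empty_nil.symm, rfl⟩
  have hrel := fold_rel aPad b conv (PySem.List.pyRange 0 n 1)
    (0, [], PySem.Dict.empty) (0, "", 0, 1, PySem.Dict.empty) hc hinit
  set finA := (PySem.List.pyRange 0 n 1).foldl (fourierStepA aPad b) (0, [], PySem.Dict.empty) with hfa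
  set finB := (PySem.List.pyRange 0 n 1).foldl (fourierStepB conv) (0, "", 0, 1, PySem.Dict.empty) with hfb
  obtain ⟨hp, hnum, hcarry, hdig, hres⟩ := hrel
  rw [hres, hcarry, hdig]
  by_cases hpos : finA.1 > 0
  · rw [if_pos hpos, if_pos hpos, join_rev_append]
  · rw [if_neg hpos, if_neg hpos]
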